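-- pv_equiv track=rewrite | github.com/ton198/voice-wine-explorer | app/assistant.py | reorder_wines_by_answer
-- ===== SOURCE A (Python) =====
-- from typing import Any
--
-- def reorder_wines_by_answer(answer: str, wines: list[dict[str, Any]]) -> list[dict[str, Any]]:
--     """Put wines whose names appear in the answer first, in order of first mention."""
--     if not answer or not wines:
--         return wines
--     lower = answer.lower()
--     scored: list[tuple[int, int]] = []
--     for i, w in enumerate(wines):
--         name = (w.get("name") or "").strip()
--         if not name:
--             scored.append((10_000 + i, i))
--             continue
--         pos = lower.find(name.lower())
--         if pos < 0:
--             scored.append((5_000 + i, i))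
--         else:
--             scored.append((pos, i))
--     scored.sort(key=lambda t: (t[0], t[1]))
--     return [wines[i] for _, i in scored]
-- ===== SOURCE B (Python) =====
-- from typing import Any
--
-- def reorder_wines_by_answer(answer: str, wines: list[dict[str, Any]]) -> list[dict[str, Any]]:
--     """Put wines whose names appear in the answer first, in order of first mention.
--
--     Online insertion sort: keep a run of (rank, wine) pairs sorted by rank and
--     slot each wine in after any equal ranks as it is scanned, so no separate
--     sort pass or index projection is needed.  Ranks: a mentioned name ranks by
--     its first position in the answer; unmentioned names rank after every
--     realistic position, unnamed entries after those, both keeping scan order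
--     through the index offset.
--     """
--     if not answer or not wines:
--         return wines
--     lower = answer.lower()
--     run: list[tuple[int, Any]] = []
--     for i, w in enumerate(wines):
--         name = (w.get("name") or "").strip()
--         if not name:
--             rank = 10_000 + i
--         else:
--             pos = lower.find(name.lower())
--             rank = pos if pos >= 0 else 5_000 + i
--         j = 0
--         while j < len(run) and run[j][0] <= rank:
--             j += 1
--         run.insert(j, (rank, w))
--     return [w for _, w in run]
-- ===== Notes on version B (the rewrite author's own statement) =====
-- stated objective: alternative
-- what changed: Instead of building a scored index list, sorting it and projecting back through the indices, B keeps a single run of (rank, wine) pairs sorted by rank and slots each wine in behind any equal ranks as it scans, so there is no separate sort pass and no index projection.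
import Mathlib
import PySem

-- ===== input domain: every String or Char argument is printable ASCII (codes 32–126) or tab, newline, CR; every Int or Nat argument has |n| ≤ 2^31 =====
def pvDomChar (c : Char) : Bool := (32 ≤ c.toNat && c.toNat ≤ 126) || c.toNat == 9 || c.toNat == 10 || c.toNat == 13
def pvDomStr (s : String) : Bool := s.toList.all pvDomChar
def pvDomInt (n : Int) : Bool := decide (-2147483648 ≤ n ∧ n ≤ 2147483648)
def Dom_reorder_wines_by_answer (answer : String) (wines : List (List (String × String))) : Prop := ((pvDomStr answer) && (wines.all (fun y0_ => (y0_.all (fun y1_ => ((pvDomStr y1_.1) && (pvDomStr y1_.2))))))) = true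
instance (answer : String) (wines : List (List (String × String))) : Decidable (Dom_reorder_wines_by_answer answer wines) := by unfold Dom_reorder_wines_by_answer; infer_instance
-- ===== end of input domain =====

-- B replaces A's score-sort-project pipeline by an online insertion sort: it keeps a run of
-- (rank, wine) pairs sorted by rank and slots each wine in behind any equal ranks as it scans.


abbrev PvWine := List (String × String)

-- ===== PORT A =====
-- the loop body: name = (w.get("name") or "").strip(); append the scored pair
def pvStepA (lower : String) (acc : List (Int × Int)) (p : Int × PvWine) : List (Int × Int) :=
  let name := PySem.Str.strip ((PySem.Dict.mk p.2).getD "name" "")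
  if name = "" then acc ++ [(10000 + p.1, p.1)]
  else
    let pos := PySem.Str.find lower (PySem.Str.lower name)
    if pos < 0 then acc ++ [(5000 + p.1, p.1)]
    else acc ++ [(pos, p.1)]

def reorder_wines_by_answer (answer : String) (wines : List PvWine) : List PvWine :=
  if answer = "" ∨ wines = [] then wines else
  let lower := PySem.Str.lower answer
  let scored := (PySem.List.enumerate wines 0).foldl (pvStepA lower) []
  let scored' := PySem.List.sorted2 scored (fun t => t.1) (fun t => t.2)
  -- wines[i]: every index in scored is an enumerate index, hence in range
  scored'.map (fun t => PySem.List.pyGetD wines t.2 [])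

-- ===== PORT B =====
-- the while loop: advance j past every pair with rank ≤ the new rank, insert there
def pvIns (x : Int × PvWine) : List (Int × PvWine) → List (Int × PvWine)
  | [] => [x]
  | y :: t => if x.1 < y.1 then x :: y :: t else y :: pvIns x t

-- the loop body: compute the rank, insert (rank, w) into the sorted run
def pvStepB (lower : String) (run : List (Int × PvWine)) (p : Int × PvWine) : List (Int × PvWine) :=
  let name := PySem.Str.strip ((PySem.Dict.mk p.2).getD "name" "")
  let rank :=
    if name = "" then 10000 + p.1
    else
      let pos := PySem.Str.find lower (PySem.Str.lower name)
      if pos ≥ 0 then pos else 5000 + p.1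
  pvIns (rank, p.2) run

def reorder_wines_by_answer_alt (answer : String) (wines : List PvWine) : List PvWine :=
  if answer = "" ∨ wines = [] then wines else
  let lower := PySem.Str.lower answer
  let run := (PySem.List.enumerate wines 0).foldl (pvStepB lower) []
  run.map (fun t => t.2)

-- ===== PRECONDITION & SPEC =====
def Spec_reorder_wines_by_answer (answer : String) (wines : List (List (String × String))) (out : List (List (String × String))) : Prop := out = reorder_wines_by_answer_alt answer wines
instance (answer : String) (wines : List (List (String × String))) (out : List (List (String × String))) : Decidable (Spec_reorder_wines_by_answer answer wines out) := by unfold Spec_reorder_wines_by_answer; infer_instance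

-- ===== CLAIM (what is proved, stated in full; the proofs are below) =====
def Claim_equal_reorder_wines_by_answer : Prop := ∀ (answer : String) (wines : List (List (String × String))), Dom_reorder_wines_by_answer answer wines → Spec_reorder_wines_by_answer answer wines (reorder_wines_by_answer answer wines)

-- ===== LEMMAS AND PROOFS =====

-- the (key, index) pair A scores wine p with
def pvName (p : Int × PvWine) : String :=
  PySem.Str.strip ((PySem.Dict.mk p.2).getD "name" "")

def pvKeyOf (lower : String) (p : Int × PvWine) : Int × Int :=
  if pvName p = "" then (10000 + p.1, p.1)
  else if PySem.Str.find lower (PySem.Str.lower (pvName p)) < 0 then (5000 + p.1, p.1)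
  else (PySem.Str.find lower (PySem.Str.lower (pvName p)), p.1)

-- instrumented B entries: (rank, index, wine)
abbrev PvT := Int × Int × PvWine

def pvTag (lower : String) (p : Int × PvWine) : PvT := ((pvKeyOf lower p).1, p.1, p.2)

def pvInsT (x : PvT) : List PvT → List PvT
  | [] => [x]
  | y :: t => if x.1 < y.1 then x :: y :: t else y :: pvInsT x t

def pvProj (t : PvT) : Int × PvWine := (t.1, t.2.2)

theorem pvKeyOf_snd (lower : String) (p : Int × PvWine) : (pvKeyOf lower p).2 = p.1 := by
  unfold pvKeyOf; split_ifs <;> rfl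

theorem pvStepA_eq (lower : String) (acc : List (Int × Int)) (p : Int × PvWine) :
    pvStepA lower acc p = acc ++ [pvKeyOf lower p] := by
  unfold pvStepA pvKeyOf pvName
  dsimp only
  split_ifs <;> rfl

theorem pvA_scored (lower : String) (l : List (Int × PvWine)) :
    l.foldl (pvStepA lower) [] = l.map (pvKeyOf lower) := by
  have hbody : pvStepA lower = fun acc p => acc ++ [pvKeyOf lower p] := by
    funext acc p; exact pvStepA_eq lower acc p
  rw [hbody, PySem.List.foldl_append_singleton_eq_map, List.nil_append]

theorem pvStepB_eq (lower : String) (run : List (Int × PvWine)) (p : Int × PvWine) :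
    pvStepB lower run p = pvIns ((pvKeyOf lower p).1, p.2) run := by
  unfold pvStepB pvKeyOf pvName
  dsimp only
  split_ifs <;> first | rfl | omega

theorem pvIns_proj (x : PvT) (l : List PvT) :
    pvIns (pvProj x) (l.map pvProj) = (pvInsT x l).map pvProj := by
  induction l with
  | nil => rfl
  | cons y t ih =>
    simp only [List.map_cons, pvIns, pvInsT, pvProj]
    split_ifs <;> simp_all [pvProj]

theorem pvFoldB_proj (lower : String) (l : List (Int × PvWine)) (accT : List PvT) :
    l.foldl (pvStepB lower) (accT.map pvProj)
      = (l.foldl (fun a p => pvInsT (pvTag lower p) a) accT).map pvProj := by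
  induction l generalizing accT with
  | nil => rfl
  | cons x t ih =>
    rw [List.foldl_cons, List.foldl_cons, pvStepB_eq]
    have h : ((pvKeyOf lower x).1, x.2) = pvProj (pvTag lower x) := rfl
    rw [h, pvIns_proj]
    exact ih _

theorem pvInsT_perm (x : PvT) (l : List PvT) : (pvInsT x l).Perm (x :: l) := by
  induction l with
  | nil => rfl
  | cons y t ih =>
    simp only [pvInsT]
    split_ifs
    · rfl
    · exact (ih.cons y).trans (List.Perm.swap x y t)

theorem pvFoldT_perm (l : List (Int × PvWine)) (f : (Int × PvWine) → PvT) (accT : List PvT) :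
    (l.foldl (fun a p => pvInsT (f p) a) accT).Perm (accT ++ l.map f) := by
  induction l generalizing accT with
  | nil => simp
  | cons x t ih =>
    rw [List.foldl_cons, List.map_cons]
    refine (ih _).trans ?_
    refine (List.Perm.append_right (t.map f) ((pvInsT_perm (f x) accT))).trans ?_
    simpa using List.perm_middle.symm

-- the strict order B's run ends up in: rank first, arrival index breaks ties
def pvRel (a b : PvT) : Prop := toLex (a.1, a.2.1) < toLex (b.1, b.2.1)

theorem pvRel_rank_le {a b : PvT} (h : pvRel a b) : a.1 ≤ b.1 := by
  rcases Prod.Lex.toLex_lt_toLex.1 h with h | ⟨h, _⟩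
  · exact le_of_lt h
  · exact le_of_eq h

theorem pvInsT_pairwise (x : PvT) (acc : List PvT)
    (hp : acc.Pairwise pvRel) (hi : ∀ y ∈ acc, y.2.1 < x.2.1) :
    (pvInsT x acc).Pairwise pvRel := by
  induction acc with
  | nil => simp [pvInsT, List.pairwise_cons]
  | cons y t ih =>
    rw [List.pairwise_cons] at hp
    simp only [pvInsT]
    split_ifs with h
    · rw [List.pairwise_cons]
      refine ⟨?_, List.pairwise_cons.2 hp⟩
      intro z hz
      rcases List.mem_cons.1 hz with rfl | hz
      · exact Prod.Lex.toLex_lt_toLex.2 (Or.inl h)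
      · have : y.1 ≤ z.1 := pvRel_rank_le (hp.1 z hz)
        exact Prod.Lex.toLex_lt_toLex.2 (Or.inl (lt_of_lt_of_le h this))
    · rw [List.pairwise_cons]
      refine ⟨?_, ih hp.2 (fun z hz => hi z (List.mem_cons_of_mem y hz))⟩
      intro z hz
      rcases List.mem_cons.1 ((pvInsT_perm x t).mem_iff.1 hz) with rfl | hz
      · rcases lt_or_eq_of_le (not_lt.1 h) with h' | h'
        · exact Prod.Lex.toLex_lt_toLex.2 (Or.inl h')
        · exact Prod.Lex.toLex_lt_toLex.2 (Or.inr ⟨h', hi y (List.mem_cons_self)⟩)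
      · exact hp.1 z hz

theorem pvFoldT_pairwise (l : List (Int × PvWine)) (lower : String) (accT : List PvT)
    (hp : accT.Pairwise pvRel)
    (hlt : ∀ y ∈ accT, ∀ p ∈ l, y.2.1 < p.1)
    (hl : l.Pairwise (fun p q => p.1 < q.1)) :
    (l.foldl (fun a p => pvInsT (pvTag lower p) a) accT).Pairwise pvRel := by
  induction l generalizing accT with
  | nil => exact hp
  | cons x t ih =>
    rw [List.foldl_cons]
    rw [List.pairwise_cons] at hl
    refine ih _ ?_ ?_ hl.2
    · exact pvInsT_pairwise _ _ hp (fun y hy => hlt y hy x List.mem_cons_self)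
    · intro y hy p hpt
      rcases List.mem_cons.1 ((pvInsT_perm (pvTag lower x) accT).mem_iff.1 hy) with rfl | hy
      · exact hl.1 p hpt
      · exact hlt y hy p (List.mem_cons_of_mem x hpt)

theorem pvSorted2_eq_sorted {α : Type} (xs : List α) (k1 k2 : α → Int) :
    PySem.List.sorted2 xs k1 k2 = PySem.List.sorted xs (fun x => toLex (k1 x, k2 x)) := by
  unfold PySem.List.sorted2 PySem.List.sorted
  have h : (fun (a b : α) => decide (k1 a < k1 b) || (!decide (k1 b < k1 a) && decide (k2 a < k2 b)))
      = (fun a b => decide (toLex (k1 a, k2 a) < toLex (k1 b, k2 b))) := by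
    funext a b
    rcases lt_trichotomy (k1 a) (k1 b) with h | h | h
    · simp [Prod.Lex.toLex_lt_toLex, h, not_lt_of_gt h]
    · simp [Prod.Lex.toLex_lt_toLex, h]
    · simp [Prod.Lex.toLex_lt_toLex, h, not_lt_of_gt h, ne_of_gt h]
  simp only [if_neg (by simp : ¬ (false = true))] at *
  rw [h]

-- ===== VERDICT (by name: the statement is the Claim_ definition above) =====
set_option maxHeartbeats 1000000 in
theorem reorder_wines_by_answer_spec : Claim_equal_reorder_wines_by_answer := by
  intro answer wines _
  unfold Spec_reorder_wines_by_answer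
  by_cases hg : answer = "" ∨ wines = []
  · unfold reorder_wines_by_answer reorder_wines_by_answer_alt
    rw [if_pos hg, if_pos hg]
  · unfold reorder_wines_by_answer reorder_wines_by_answer_alt
    rw [if_neg hg, if_neg hg]
    dsimp only
    set lower := PySem.Str.lower answer with hlower
    set l := PySem.List.enumerate wines 0 with hl
    rw [pvA_scored, pvSorted2_eq_sorted]
    have hfold : l.foldl (pvStepB lower) [] =
        (l.foldl (fun a p => pvInsT (pvTag lower p) a) []).map pvProj := by
      have := pvFoldB_proj lower l []
      simpa using this
    rw [hfold]
    set M := l.foldl (fun a p => pvInsT (pvTag lower p) a) [] with hM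
    have hMperm : M.Perm (l.map (pvTag lower)) := by
      simpa using pvFoldT_perm l (pvTag lower) []
    have hbase : l.Pairwise (fun p q => p.1 < q.1) := PySem.List.pairwise_lt_enumerate wines 0
    have hMpair : M.Pairwise pvRel :=
      pvFoldT_pairwise l lower [] (by simp) (by simp) hbase
    -- A's sorted key list is exactly M's key list
    have hsorted : PySem.List.sorted (l.map (pvKeyOf lower)) (fun t => toLex (t.1, t.2)) =
        M.map (fun t => (t.1, t.2.1)) := by
      refine PySem.List.sorted_eq_of_perm_of_pairwise_lt _ _ _ ?_ ?_
      · refine (hMperm.map (fun t => (t.1, t.2.1))).trans ?_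
        rw [List.map_map]
        have hmaps : l.map ((fun (t : PvT) => (t.1, t.2.1)) ∘ pvTag lower) = l.map (pvKeyOf lower) := by
          refine List.map_congr_left ?_
          intro p _
          have h2 := pvKeyOf_snd lower p
          simp only [Function.comp, pvTag]
          exact Prod.ext rfl h2.symm
        rw [hmaps]
      · rw [List.pairwise_map]
        exact hMpair
    rw [hsorted, List.map_map, List.map_map]
    refine List.map_congr_left ?_
    intro e he
    have hmem : e ∈ l.map (pvTag lower) := hMperm.mem_iff.mp he
    rcases List.mem_map.mp hmem with ⟨p, hp, rfl⟩
    rcases (PySem.List.mem_enumerate_iff wines 0 p).mp (hl ▸ hp) with ⟨k, hk, rfl⟩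
    simp [pvTag, pvProj, List.getD_eq_getElem?_getD, hk]
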